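-- pv_equiv track=rewrite | github.com/martincesnovar/racunalnistvo | Tomo/casovna-zahtevnost/najvecje_podvsote.py | intervali_najvecjih_vsot_kubicna
-- ===== SOURCE A (Python) =====
-- def intervali_najvecjih_vsot_kubicna(sez):
--     '''vrne množico parov indeksov'''
--     opt = 0
--     mnozica = set()
--     n = len(sez)
--     for i in range(n):
--         for j in range(i, n):
--             s = sez[i]
--             for k in range(i + 1, j + 1):
--                 s = s + sez[k]
--             if s>=opt:
--                 if s > opt:
--                     opt = s
--                     mnozica.clear() #Spraznemo množico
--                 mnozica.add((i,j+1))
--     return mnozica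
-- ===== SOURCE B (Python) =====
-- def intervali_najvecjih_vsot_kubicna(sez):
--     '''vrne mnozico parov indeksov'''
--     pref = [0]
--     for x in sez:
--         pref.append(pref[-1] + x)
--     n = len(sez)
--     best = None
--     for i in range(n):
--         for j in range(i + 1, n + 1):
--             s = pref[j] - pref[i]
--             if best is None or s > best:
--                 best = s
--     if best is None or best < 0:
--         return set()
--     return {(i, j) for i in range(n) for j in range(i + 1, n + 1) if pref[j] - pref[i] == best}
-- ===== Notes on version B (the rewrite author's own statement) =====
-- stated objective: faster
-- what changed: Replaces A's cubic triple loop (recomputing each interval sum element by element) with a prefix-sum array: one O(n^2) pass finds the maximum interval sum, a second O(n^2) pass collects all index pairs attaining it, reproducing A's behaviour including the empty result when every interval sum is negative.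
import Mathlib
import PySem

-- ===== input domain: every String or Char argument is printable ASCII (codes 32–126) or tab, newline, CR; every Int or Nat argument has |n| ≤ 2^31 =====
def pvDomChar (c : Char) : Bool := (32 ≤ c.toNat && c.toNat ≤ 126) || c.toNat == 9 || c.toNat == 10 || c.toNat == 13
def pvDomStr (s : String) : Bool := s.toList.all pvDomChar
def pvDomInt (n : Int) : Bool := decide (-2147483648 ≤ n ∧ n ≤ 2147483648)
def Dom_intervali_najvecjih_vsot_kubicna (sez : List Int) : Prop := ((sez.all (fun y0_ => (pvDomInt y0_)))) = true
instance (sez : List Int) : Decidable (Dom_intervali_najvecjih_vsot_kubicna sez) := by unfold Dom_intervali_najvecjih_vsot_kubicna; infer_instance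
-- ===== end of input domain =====

-- B replaces A's cubic triple loop by prefix sums: one O(n^2) max pass and one O(n^2) collection pass (objective: faster, asymptotic).

-- ===== PORT A =====
def intervali_najvecjih_vsot_kubicna (sez : List Int) : List (List Int) :=
  let n : Int := PySem.List.len sez
  let r := (PySem.List.pyRange 0 n 1).foldl (fun (st : Int × List (List Int)) i =>
    (PySem.List.pyRange i n 1).foldl (fun st j =>
      let s := (PySem.List.pyRange (i+1) (j+1) 1).foldl
          (fun s k => s + PySem.List.pyGetD sez k 0) (PySem.List.pyGetD sez i 0)
      if s ≥ st.1 then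
        (if s > st.1 then (s, PySem.Set.add PySem.Set.empty [i, j+1])
         else (st.1, PySem.Set.add st.2 [i, j+1]))
      else st) st) ((0 : Int), (PySem.Set.empty : List (List Int)))
  r.2

-- ===== PORT B =====
def intervali_najvecjih_vsot_kubicna_alt (sez : List Int) : List (List Int) :=
  let pref := sez.foldl (fun (p : List Int) x => p ++ [PySem.List.pyGetD p (-1) 0 + x]) [0]
  let n : Int := PySem.List.len sez
  let best := (PySem.List.pyRange 0 n 1).foldl (fun (b : Option Int) i =>
      (PySem.List.pyRange (i+1) (n+1) 1).foldl (fun b j =>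
        let s := PySem.List.pyGetD pref j 0 - PySem.List.pyGetD pref i 0
        match b with
        | none => some s
        | some v => if s > v then some s else b) b) none
  match best with
  | none => PySem.Set.empty
  | some v =>
    if v < 0 then PySem.Set.empty
    else PySem.Set.ofList ((PySem.List.pyRange 0 n 1).flatMap (fun i =>
      ((PySem.List.pyRange (i+1) (n+1) 1).filter
        (fun j => PySem.List.pyGetD pref j 0 - PySem.List.pyGetD pref i 0 == v)).map
      (fun j => [i, j])))

-- ===== PRECONDITION & SPEC =====
def Spec_intervali_najvecjih_vsot_kubicna (sez : List Int) (out : List (List Int)) : Prop := out = intervali_najvecjih_vsot_kubicna_alt sez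
instance (sez : List Int) (out : List (List Int)) : Decidable (Spec_intervali_najvecjih_vsot_kubicna sez out) := by unfold Spec_intervali_najvecjih_vsot_kubicna; infer_instance

-- ===== CLAIM (what is proved, stated in full; the proofs are below) =====
def Claim_equal_intervali_najvecjih_vsot_kubicna : Prop := ∀ (sez : List Int), Dom_intervali_najvecjih_vsot_kubicna sez → Spec_intervali_najvecjih_vsot_kubicna sez (intervali_najvecjih_vsot_kubicna sez)

-- ===== LEMMAS AND PROOFS =====

-- pvT sez k = sum of the first k elements; pvF sez (i,j) = sum of sez[i:j]
def pvT (sez : List Int) (k : Int) : Int := (sez.take k.toNat).sum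
def pvF (sez : List Int) (p : Int × Int) : Int := pvT sez p.2 - pvT sez p.1
def pvEnc (p : Int × Int) : List Int := [p.1, p.2]
-- the (i, j) interval pairs both programs enumerate, in their shared lexicographic order
def pvPairs (sez : List Int) : List (Int × Int) :=
  (PySem.List.pyRange 0 (sez.length : Int) 1).flatMap (fun i =>
    (PySem.List.pyRange (i+1) ((sez.length : Int)+1) 1).map (fun j => (i, j)))
-- A's loop body and B's max-loop body, abstracted over the interval-sum function
def pvStepA (f : Int × Int → Int) (st : Int × List (List Int)) (p : Int × Int) : Int × List (List Int) :=
  if f p ≥ st.1 then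
    (if f p > st.1 then (f p, PySem.Set.add PySem.Set.empty (pvEnc p))
     else (st.1, PySem.Set.add st.2 (pvEnc p)))
  else st
def pvStepB (f : Int × Int → Int) (b : Option Int) (p : Int × Int) : Option Int :=
  match b with
  | none => some (f p)
  | some v => if f p > v then some (f p) else b
def pvMax (f : Int × Int → Int) (P : List (Int × Int)) (m : Int) : Int :=
  P.foldl (fun a p => max a (f p)) m

lemma pvGetD_append_last (l : List Int) (a : Int) : PySem.List.pyGetD (l ++ [a]) (-1) 0 = a := by
  simp [PySem.List.pyGetD, PySem.List.pyGet?, PySem.List.pyIdx?]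

lemma pvPref_scanl (xs : List Int) : ∀ (acc : List Int) (a : Int),
    xs.foldl (fun (p : List Int) x => p ++ [PySem.List.pyGetD p (-1) 0 + x]) (acc ++ [a])
      = acc ++ List.scanl (· + ·) a xs := by
  induction xs with
  | nil => intro acc a; simp
  | cons x t ih =>
    intro acc a
    simp only [List.foldl_cons, List.scanl_cons, pvGetD_append_last]
    rw [show (acc ++ [a]) ++ [a + x] = (acc ++ [a]) ++ [a + x] from rfl]
    have := ih (acc ++ [a]) (a + x)
    rw [this]; simp

lemma pvPref_eq (sez : List Int) :
    sez.foldl (fun (p : List Int) x => p ++ [PySem.List.pyGetD p (-1) 0 + x]) [0]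
      = List.scanl (· + ·) 0 sez := by
  have := pvPref_scanl sez [] 0
  simpa using this

lemma pvScanl_getD (xs : List Int) : ∀ (a : Int) (k : Nat), k ≤ xs.length →
    (List.scanl (· + ·) a xs).getD k 0 = a + (xs.take k).sum := by
  induction xs with
  | nil => intro a k hk; simp at hk; subst hk; simp
  | cons x t ih =>
    intro a k hk
    cases k with
    | zero => simp
    | succ k =>
      simp only [List.scanl_cons, List.getD_cons_succ, List.take_succ_cons, List.sum_cons]
      rw [ih (a + x) k (by simpa using hk)]; ring

lemma pvPref_getD (sez : List Int) (j : Int) (h0 : 0 ≤ j) (hn : j ≤ (sez.length : Int)) :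
    PySem.List.pyGetD (List.scanl (· + ·) 0 sez) j 0 = pvT sez j := by
  have hj : j = ((j.toNat : Nat) : Int) := by omega
  rw [hj, PySem.List.pyGetD_natCast, pvScanl_getD sez 0 j.toNat (by omega)]
  simp [pvT, max_eq_left h0]

-- sum of sez over the index segment [a, b)
lemma pvSeg_sum (xs : List Int) : ∀ (b a : Nat), a ≤ b → b ≤ xs.length →
    ((PySem.List.pyRange (a : Int) (b : Int) 1).map (fun k => PySem.List.pyGetD xs k 0)).sum
      = (xs.take b).sum - (xs.take a).sum := by
  intro b
  induction b with
  | zero =>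
    intro a ha _; have : a = 0 := by omega
    subst this; simp [PySem.List.pyRange_one_eq_nil]
  | succ b ih =>
    intro a ha hb
    by_cases hab : a = b + 1
    · subst hab; rw [PySem.List.pyRange_one_eq_nil (by omega)]; simp
    · have hab' : a ≤ b := by omega
      have : ((b : Int) + 1) = ((b + 1 : Nat) : Int) := by push_cast; ring
      rw [show ((b + 1 : Nat) : Int) = (b : Int) + 1 from by push_cast; ring,
        PySem.List.pyRange_one_succ_right (by exact_mod_cast hab')]
      simp only [List.map_append, List.sum_append, List.map_cons, List.map_nil, List.sum_cons,
        List.sum_nil]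
      rw [ih a hab' (by omega), PySem.List.pyGetD_natCast]
      have hblen : b < xs.length := by omega
      rw [List.take_add_one]
      simp [List.getD_eq_getElem?_getD, hblen]
      ring

lemma pvSeg_sum' (xs : List Int) (a b : Int) (h0 : 0 ≤ a) (hab : a ≤ b) (hb : b ≤ (xs.length : Int)) :
    ((PySem.List.pyRange a b 1).map (fun k => PySem.List.pyGetD xs k 0)).sum
      = pvT xs b - pvT xs a := by
  have ha' : a = ((a.toNat : Nat) : Int) := by omega
  have hb' : b = ((b.toNat : Nat) : Int) := by omega
  rw [ha', hb', pvSeg_sum xs b.toNat a.toNat (by omega) (by omega)]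
  simp [pvT, max_eq_left h0, max_eq_left (le_trans h0 hab)]

-- A's innermost loop computes the interval sum sez[i:j+1]
lemma pvInnerA (sez : List Int) (i j : Int) (h0 : 0 ≤ i) (hij : i ≤ j) (hj : j < (sez.length : Int)) :
    (PySem.List.pyRange (i+1) (j+1) 1).foldl (fun s k => s + PySem.List.pyGetD sez k 0)
      (PySem.List.pyGetD sez i 0) = pvF sez (i, j+1) := by
  rw [PySem.List.foldl_add]
  have hcons : PySem.List.pyRange i (j+1) 1 = i :: PySem.List.pyRange (i+1) (j+1) 1 :=
    PySem.List.pyRange_one_cons (by omega)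
  have := pvSeg_sum' sez i (j+1) h0 (by omega) (by omega)
  rw [hcons] at this
  simp only [List.map_cons, List.sum_cons] at this
  simpa [pvF] using this

-- running max over an Option accumulator (B's best loop)
lemma pvLoopB_some (f : Int × Int → Int) (P : List (Int × Int)) : ∀ (m : Int),
    P.foldl (pvStepB f) (some m) = some (pvMax f P m) := by
  induction P with
  | nil => intro m; simp [pvMax]
  | cons p t ih =>
    intro m
    simp only [List.foldl_cons, pvStepB]
    by_cases h : f p > m
    · rw [if_pos h, ih (f p)]
      have hm : max m (f p) = f p := by omega
      simp [pvMax, List.foldl_cons, hm]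
    · rw [if_neg h, ih m]
      have hm : max m (f p) = m := by omega
      simp [pvMax, List.foldl_cons, hm]

lemma pvLoopB_none (f : Int × Int → Int) (p : Int × Int) (t : List (Int × Int)) :
    (p :: t).foldl (pvStepB f) none = some (pvMax f t (f p)) := by
  simp only [List.foldl_cons, pvStepB]
  exact pvLoopB_some f t (f p)

lemma pvMax_max (f : Int × Int → Int) (t : List (Int × Int)) : ∀ (a b : Int),
    pvMax f t (max a b) = max a (pvMax f t b) := by
  induction t with
  | nil => intro a b; simp [pvMax]
  | cons q s ih =>
    intro a b
    simp only [pvMax, List.foldl_cons] at *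
    rw [max_assoc, ih]

-- A's double loop: final opt is the max (from 0), final set is the intervals attaining it
lemma pvLoopA (f : Int × Int → Int) (P : List (Int × Int)) : ∀ (M0 : Int) (S0 : List (List Int)),
    (P.map pvEnc).Nodup → (∀ p ∈ P, pvEnc p ∉ S0) →
    P.foldl (pvStepA f) (M0, S0)
      = (pvMax f P M0,
         (if pvMax f P M0 = M0 then S0 else []) ++ (P.filter (fun p => f p == pvMax f P M0)).map pvEnc) := by
  induction P using List.reverseRecOn with
  | nil => intro M0 S0 _ _; simp [pvMax]
  | append_singleton P p ih =>
    intro M0 S0 hnd hdis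
    rw [List.map_append] at hnd
    simp only [List.map_cons, List.map_nil] at hnd
    rw [List.nodup_append] at hnd
    have hnd' : (P.map pvEnc).Nodup := hnd.1
    have hpP : pvEnc p ∉ P.map pvEnc := by
      intro hmem
      exact hnd.2.2 _ hmem (pvEnc p) (by simp) rfl
    have hdis' : ∀ q ∈ P, pvEnc q ∉ S0 := fun q hq => hdis q (by simp [hq])
    have hM0le : M0 ≤ pvMax f P M0 := (PySem.List.le_foldl_max_int P f M0).1
    have hle : ∀ q ∈ P, f q ≤ pvMax f P M0 := (PySem.List.le_foldl_max_int P f M0).2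
    rw [List.foldl_append, ih M0 S0 hnd' hdis']
    set M := pvMax f P M0 with hM
    have hM' : pvMax f (P ++ [p]) M0 = max M (f p) := by
      simp [pvMax, List.foldl_append, hM]
    simp only [List.foldl_cons, List.foldl_nil]
    rcases lt_trichotomy (f p) M with h | h | h
    · -- f p < M : nothing happens
      rw [pvStepA, if_neg (by simp; omega)]
      rw [hM', max_eq_left h.le, List.filter_append]
      simp [List.filter, show (f p == M) = false from by simp; omega]
    · -- f p = M : the interval is appended to the current set
      have hmax : max M (f p) = M := by omega
      have hnotmem : pvEnc p ∉ (if M = M0 then S0 else []) ++ (P.filter (fun q => f q == M)).map pvEnc := by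
        intro hmem
        rcases List.mem_append.mp hmem with hmem | hmem
        · by_cases hMM : M = M0
          · rw [if_pos hMM] at hmem; exact hdis p (by simp) hmem
          · rw [if_neg hMM] at hmem; simp at hmem
        · rcases List.mem_map.mp hmem with ⟨q, hq, he⟩
          exact hpP (he ▸ List.mem_map_of_mem (List.mem_filter.mp hq).1)
      rw [pvStepA, if_pos (show f p ≥ M by omega), if_neg (show ¬ f p > M by omega)]
      rw [hM', hmax, List.filter_append]
      have hfp : [p].filter (fun q => f q == M) = [p] := by simp [h]
      rw [hfp]
      have hadd : PySem.Set.add ((if M = M0 then S0 else []) ++ (P.filter (fun q => f q == M)).map pvEnc) (pvEnc p)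
          = ((if M = M0 then S0 else []) ++ (P.filter (fun q => f q == M)).map pvEnc) ++ [pvEnc p] := by
        simp only [PySem.Set.add, PySem.Set.contains]
        rw [if_neg (by simpa using hnotmem)]
      rw [hadd]
      simp
    · -- f p > M : the set is cleared and restarted with this interval
      have hmax : max M (f p) = f p := by omega
      rw [pvStepA, if_pos (show f p ≥ M by omega), if_pos (show f p > M by omega)]
      rw [hM', hmax]
      have hfilP : P.filter (fun q => f q == f p) = [] := by
        rw [List.filter_eq_nil_iff]; intro q hq
        have := hle q hq; simp; omega
      rw [List.filter_append, hfilP]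
      rw [if_neg (show ¬ f p = M0 by omega)]
      simp [PySem.Set.add, PySem.Set.empty, PySem.Set.contains]

lemma pvEnc_inj : Function.Injective pvEnc := by
  intro p q h
  simp only [pvEnc, List.cons.injEq, and_true] at h
  exact Prod.ext h.1 h.2

lemma pvPairs_nodup (sez : List Int) : (pvPairs sez).Nodup := by
  rw [pvPairs, List.nodup_flatMap]
  constructor
  · intro i _
    refine List.Nodup.map ?_ (PySem.List.nodup_pyRange_one _ _)
    intro a b h
    simpa using h
  · have h := PySem.List.nodup_pyRange_one 0 (sez.length : Int)
    refine h.imp ?_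
    intro i i' hne
    intro a ha ha'
    simp only [List.mem_map] at ha ha'
    rcases ha with ⟨j, _, rfl⟩
    rcases ha' with ⟨j', _, hj'⟩
    have hii : i' = i := by simpa using congrArg Prod.fst hj'
    exact hne hii.symm

lemma pvPairs_nodup_map (sez : List Int) : ((pvPairs sez).map pvEnc).Nodup :=
  (pvPairs_nodup sez).map pvEnc_inj

lemma pvShift (i n : Int) : (PySem.List.pyRange i n 1).map (fun j => ((i, j+1) : Int × Int))
    = (PySem.List.pyRange (i+1) (n+1) 1).map (fun j => (i, j)) := by
  rw [PySem.List.pyRange_one, PySem.List.pyRange_one]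
  simp only [List.map_map]
  rw [show (n + 1 - (i + 1)) = n - i from by ring]
  apply List.map_congr_left
  intro k _
  simp only [Function.comp]
  have : i + (k : Int) + 1 = i + 1 + (k : Int) := by ring
  rw [this]

-- A's port is the abstract double loop over the interval pairs
lemma pvA_eq (sez : List Int) :
    intervali_najvecjih_vsot_kubicna sez
      = ((pvPairs sez).foldl (pvStepA (pvF sez)) (0, PySem.Set.empty)).2 := by
  rw [intervali_najvecjih_vsot_kubicna]
  simp only [PySem.List.len_eq]
  congr 1
  rw [pvPairs, List.foldl_flatMap]
  apply PySem.List.foldl_congr_mem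
  intro st i hi
  rw [PySem.List.mem_pyRange_one] at hi
  have hstep : ∀ (st' : Int × List (List Int)), ∀ j ∈ PySem.List.pyRange i (sez.length : Int) 1,
      (let s := (PySem.List.pyRange (i+1) (j+1) 1).foldl
          (fun s k => s + PySem.List.pyGetD sez k 0) (PySem.List.pyGetD sez i 0)
       if s ≥ st'.1 then
         (if s > st'.1 then (s, PySem.Set.add PySem.Set.empty [i, j+1])
          else (st'.1, PySem.Set.add st'.2 [i, j+1]))
       else st') = pvStepA (pvF sez) st' (i, j+1) := by
    intro st' j hj
    rw [PySem.List.mem_pyRange_one] at hj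
    simp only [pvStepA, pvEnc, pvInnerA sez i j hi.1 hj.1 hj.2]
  rw [PySem.List.foldl_congr_mem _ _ _ _ hstep, ← List.foldl_map, pvShift, List.foldl_map]

-- B's best loop is the abstract running max over the same pairs
lemma pvB_best (sez : List Int) :
    (PySem.List.pyRange 0 (sez.length : Int) 1).foldl (fun (b : Option Int) i =>
      (PySem.List.pyRange (i+1) ((sez.length : Int)+1) 1).foldl (fun b j =>
        let s := PySem.List.pyGetD (List.scanl (· + ·) 0 sez) j 0
                 - PySem.List.pyGetD (List.scanl (· + ·) 0 sez) i 0
        match b with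
        | none => some s
        | some v => if s > v then some s else b) b) none
      = (pvPairs sez).foldl (pvStepB (pvF sez)) none := by
  rw [pvPairs, List.foldl_flatMap]
  apply PySem.List.foldl_congr_mem
  intro b i hi
  rw [PySem.List.mem_pyRange_one] at hi
  rw [List.foldl_map]
  apply PySem.List.foldl_congr_mem
  intro b' j hj
  rw [PySem.List.mem_pyRange_one] at hj
  simp only [pvStepB, pvF,
    pvPref_getD sez j (by omega) (by omega), pvPref_getD sez i (by omega) (by omega)]

-- B's set comprehension collects exactly the pairs attaining v, in pair order
lemma pvB_comp (sez : List Int) (v : Int) :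
    (PySem.List.pyRange 0 (sez.length : Int) 1).flatMap (fun i =>
      ((PySem.List.pyRange (i+1) ((sez.length : Int)+1) 1).filter
        (fun j => PySem.List.pyGetD (List.scanl (· + ·) 0 sez) j 0
                  - PySem.List.pyGetD (List.scanl (· + ·) 0 sez) i 0 == v)).map
      (fun j => [i, j]))
      = ((pvPairs sez).filter (fun p => pvF sez p == v)).map pvEnc := by
  rw [pvPairs, List.filter_flatMap, List.map_flatMap]
  apply List.flatMap_congr
  intro i hi
  rw [PySem.List.mem_pyRange_one] at hi
  rw [List.filter_map, List.map_map]
  have : ∀ j ∈ PySem.List.pyRange (i+1) ((sez.length : Int)+1) 1,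
      (PySem.List.pyGetD (List.scanl (· + ·) 0 sez) j 0
        - PySem.List.pyGetD (List.scanl (· + ·) 0 sez) i 0 == v)
      = ((fun p => pvF sez p == v) ∘ (fun j => ((i, j) : Int × Int))) j := by
    intro j hj
    rw [PySem.List.mem_pyRange_one] at hj
    simp only [Function.comp, pvF,
      pvPref_getD sez j (by omega) (by omega), pvPref_getD sez i (by omega) (by omega)]
  rw [List.filter_congr this]
  rfl

lemma pvOfList_go {α : Type} [BEq α] [LawfulBEq α] (xs : List α) : ∀ (acc : List α),
    (acc ++ xs).Nodup → xs.foldl PySem.Set.add acc = acc ++ xs := by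
  induction xs with
  | nil => intro acc _; simp
  | cons x t ih =>
    intro acc hnd
    have hx : x ∉ acc := by
      rw [List.nodup_append] at hnd
      intro hmem; exact hnd.2.2 x hmem x (by simp) rfl
    simp only [List.foldl_cons]
    have hadd : PySem.Set.add acc x = acc ++ [x] := by
      simp only [PySem.Set.add, PySem.Set.contains]
      rw [if_neg (by simpa using hx)]
    rw [hadd, ih (acc ++ [x]) (by simpa using hnd)]
    simp

lemma pvOfList_self {α : Type} [BEq α] [LawfulBEq α] (xs : List α) (h : xs.Nodup) :
    PySem.Set.ofList xs = xs := by
  rw [PySem.Set.ofList]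
  simpa using pvOfList_go xs [] (by simpa using h)

-- ===== VERDICT (by name: the statement is the Claim_ definition above) =====
theorem intervali_najvecjih_vsot_kubicna_spec : Claim_equal_intervali_najvecjih_vsot_kubicna := by
  intro sez _
  rw [Spec_intervali_najvecjih_vsot_kubicna, pvA_eq, intervali_najvecjih_vsot_kubicna_alt]
  simp only [PySem.List.len_eq, pvPref_eq]
  rw [pvB_best sez]
  rw [pvLoopA (pvF sez) (pvPairs sez) 0 PySem.Set.empty (pvPairs_nodup_map sez)
    (fun q _ hq => by simp [PySem.Set.empty] at hq)]
  cases hP : pvPairs sez with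
  | nil => simp [PySem.Set.empty, pvMax]
  | cons p t =>
    have hMB := PySem.List.le_foldl_max_int t (pvF sez) (pvF sez p)
    set MB := pvMax (pvF sez) t (pvF sez p) with hMBdef
    have hMA : pvMax (pvF sez) (p :: t) 0 = max 0 MB := by
      simp only [pvMax, List.foldl_cons]
      exact pvMax_max (pvF sez) t 0 (pvF sez p)
    have hle : ∀ q ∈ p :: t, pvF sez q ≤ MB := by
      intro q hq
      rcases List.mem_cons.mp hq with rfl | hq
      · exact hMB.1
      · exact hMB.2 q hq
    rw [pvLoopB_none, hMA]
    simp only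
    by_cases hneg : MB < 0
    · rw [if_pos hneg]
      have h0 : max 0 MB = 0 := by omega
      rw [h0]
      have : (p :: t).filter (fun q => pvF sez q == (0 : Int)) = [] := by
        rw [List.filter_eq_nil_iff]
        intro q hq
        have := hle q hq
        simp
        omega
      simp [PySem.Set.empty, this]
    · rw [if_neg hneg]
      have h0 : max 0 MB = MB := by omega
      rw [h0, pvB_comp sez MB]
      rw [pvOfList_self]
      · rw [hP]; simp [PySem.Set.empty]
      · exact (pvPairs_nodup_map sez).sublist ((List.filter_sublist).map pvEnc)
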